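-- pv_equiv track=rewrite | github.com/NischalGrg5555/SEO-Optima | dashboard/services/header_extractor.py | get_header_hierarchy
-- ===== SOURCE A (Python) =====
-- from typing import List, Dict
--
-- def get_header_hierarchy(headers: List[Dict[str, str]]) -> Dict[str, int]:
--     """
--     Get statistics about header usage
--
--     Args:
--         headers: List of header dictionaries
--
--     Returns:
--         Dictionary with count of each header level
--     """
--     hierarchy = {
--         'H1': 0,
--         'H2': 0,
--         'H3': 0,
--         'H4': 0,
--         'H5': 0,
--         'H6': 0,
--     }
--
--     for header in headers:
--         level = header.get('level', '')
--         if level in hierarchy: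
--             hierarchy[level] += 1
--
--     return hierarchy
-- ===== SOURCE B (Python) =====
-- def get_header_hierarchy(headers):
--     keys = ('H1', 'H2', 'H3', 'H4', 'H5', 'H6')
--
--     def tally(hs):  # recursion depth is O(log n): each call halves the list
--         if not hs:
--             return {k: 0 for k in keys}
--         if len(hs) == 1:
--             level = hs[0].get('level', '')
--             return {k: int(k == level) for k in keys}
--         mid = len(hs) // 2
--         left = tally(hs[:mid])
--         right = tally(hs[mid:])
--         return {k: left[k] + right[k] for k in keys}
--
--     return tally(headers)
-- ===== Notes on version B (the rewrite author's own statement) =====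
-- stated objective: alternative
-- what changed: Replaces A's single linear loop with a membership-guarded in-place dict increment by a divide-and-conquer recursion: split the header list in half, tally each half recursively (base cases empty / singleton), and merge the two count dicts by pointwise addition over the six fixed keys; correct because counts are additive under list concatenation.
import Mathlib
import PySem

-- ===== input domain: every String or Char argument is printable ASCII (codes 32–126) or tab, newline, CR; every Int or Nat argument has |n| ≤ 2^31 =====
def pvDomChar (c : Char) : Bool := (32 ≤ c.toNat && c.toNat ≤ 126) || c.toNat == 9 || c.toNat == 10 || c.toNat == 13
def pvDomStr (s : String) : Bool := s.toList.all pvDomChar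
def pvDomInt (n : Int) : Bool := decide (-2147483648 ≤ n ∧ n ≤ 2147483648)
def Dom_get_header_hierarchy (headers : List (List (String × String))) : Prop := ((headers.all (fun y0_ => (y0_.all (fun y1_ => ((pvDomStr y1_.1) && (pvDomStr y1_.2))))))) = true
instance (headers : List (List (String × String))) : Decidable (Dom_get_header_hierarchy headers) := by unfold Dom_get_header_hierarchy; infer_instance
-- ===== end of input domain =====

-- B tallies by divide and conquer (split the list in half, recurse, add the two count dicts) instead of A's linear guarded-increment loop; objective: alternative algorithm.

-- h.get('level', '') on an association-list dict (first match wins) — shared by both ports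
def pvLevel (h : List (String × String)) : String :=
  (((h.find? (fun p => p.1 == "level")).map (·.2)).getD "")

-- ===== PORT A =====
def get_header_hierarchy (headers : List (List (String × String))) : List (String × Int) :=
  let hierarchy : PySem.Dict String Int :=
    PySem.Dict.ofList [("H1", 0), ("H2", 0), ("H3", 0), ("H4", 0), ("H5", 0), ("H6", 0)]
  (headers.foldl
    (fun hierarchy header =>
      let level := pvLevel header
      if hierarchy.contains level then hierarchy.modify level 0 (· + 1) else hierarchy)
    hierarchy).items

-- ===== PORT B =====
-- the 'keys' tuple of Source B
def pvKeys : List String := ["H1", "H2", "H3", "H4", "H5", "H6"]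

-- the inner recursive 'tally' of Source B; the extra fuel argument (started at hs.length,
-- strictly decreasing through the halvings, never exhausted) only makes the recursion structural
def pvTallyF : Nat → List (List (String × String)) → List (String × Int)
  | 0, _ => pvKeys.map (fun k => (k, (0 : Int)))
  | fuel + 1, hs =>
    if hs = [] then pvKeys.map (fun k => (k, (0 : Int)))
    else if hs.length = 1 then
      -- hs[0]: hs is nonempty here, so pyGet? is some and the [] default is unreachable
      let level := pvLevel ((PySem.List.pyGet? hs 0).getD [])
      pvKeys.map (fun k => (k, if k = level then (1 : Int) else 0))
    else
      let mid : Nat := hs.length / 2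
      let left := pvTallyF fuel (PySem.List.slice hs none (some (mid : Int)))
      let right := pvTallyF fuel (PySem.List.slice hs (some (mid : Int)) none)
      -- left[k] / right[k]: every tally dict carries exactly the six keys, so the lookup is total
      pvKeys.map (fun k => (k, (PySem.Dict.mk left).getD k 0 + (PySem.Dict.mk right).getD k 0))

def get_header_hierarchy_alt (headers : List (List (String × String))) : List (String × Int) :=
  pvTallyF headers.length headers

-- ===== PRECONDITION & SPEC =====
def Spec_get_header_hierarchy (headers : List (List (String × String))) (out : List (String × Int)) : Prop := out = get_header_hierarchy_alt headers
instance (headers : List (List (String × String))) (out : List (String × Int)) : Decidable (Spec_get_header_hierarchy headers out) := by unfold Spec_get_header_hierarchy; infer_instance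

-- ===== CLAIM (what is proved, stated in full; the proofs are below) =====
def Claim_equal_get_header_hierarchy : Prop := ∀ (headers : List (List (String × String))), Dom_get_header_hierarchy headers → Spec_get_header_hierarchy headers (get_header_hierarchy headers)

-- ===== LEMMAS AND PROOFS =====
-- Both sides are shown equal to the canonical form: each of the six keys paired with its count among the levels.

-- A-side loop body
def pvStep (d : PySem.Dict String Int) (header : List (String × String)) : PySem.Dict String Int :=
  let level := pvLevel header
  if d.contains level then d.modify level 0 (· + 1) else d

lemma pvStep_keys (d : PySem.Dict String Int) (h : List (String × String)) :
    (pvStep d h).keys = d.keys := by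
  show (if d.contains (pvLevel h) then d.modify (pvLevel h) 0 (· + 1) else d).keys = d.keys
  split_ifs with hc
  · rw [PySem.Dict.keys_modify, PySem.Dict.keys_insert_of_contains _ _ hc]
  · rfl

lemma pvFold_keys (l : List (List (String × String))) (d : PySem.Dict String Int) :
    (l.foldl pvStep d).keys = d.keys := by
  induction l generalizing d with
  | nil => rfl
  | cons h t ih => simpa [List.foldl, pvStep_keys] using ih (pvStep d h)

lemma pvFold_getD (l : List (List (String × String))) (d : PySem.Dict String Int)
    (k : String) (hk : k ∈ d.keys) :
    (l.foldl pvStep d).getD k 0 = d.getD k 0 + ((l.map pvLevel).count k : Int) := by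
  induction l generalizing d with
  | nil => simp
  | cons h t ih =>
    have hk' : k ∈ (pvStep d h).keys := by rw [pvStep_keys]; exact hk
    rw [List.foldl_cons, ih (pvStep d h) hk', List.map_cons, List.count_cons]
    unfold pvStep
    by_cases hc : d.contains (pvLevel h) = true
    · simp only [hc, if_true, PySem.Dict.getD_modify]
      by_cases hke : k = pvLevel h
      · simp [hke]; ring
      · have : ¬ (pvLevel h == k) := by simpa [beq_iff_eq] using fun e => hke e.symm
        simp [hke, this]
    · have hne : ¬ (pvLevel h == k) := by
        intro e
        exact hc (by rw [PySem.Dict.contains_eq_decide_mem_keys]; simpa using (beq_iff_eq.mp e) ▸ hk)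
      simp [hc, hne]

theorem pvA_eq (headers : List (List (String × String))) :
    get_header_hierarchy headers = pvKeys.map (fun k => (k, ((headers.map pvLevel).count k : Int))) := by
  show (headers.foldl pvStep
      (PySem.Dict.ofList [("H1", 0), ("H2", 0), ("H3", 0), ("H4", 0), ("H5", 0), ("H6", 0)])).items = _
  set init : PySem.Dict String Int :=
    PySem.Dict.ofList [("H1", 0), ("H2", 0), ("H3", 0), ("H4", 0), ("H5", 0), ("H6", 0)] with hinit
  have hkeys : (headers.foldl pvStep init).keys = pvKeys := by
    rw [pvFold_keys]; decide
  have hnd : (headers.foldl pvStep init).keys.Nodup := by rw [hkeys]; decide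
  rw [PySem.Dict.items_eq_map_keys _ hnd 0, hkeys]
  refine List.map_congr_left fun k hk => ?_
  have hk' : k ∈ init.keys := by rw [hinit]; fin_cases hk <;> decide
  rw [pvFold_getD headers init k hk']
  have h0 : init.getD k 0 = 0 := by rw [hinit]; fin_cases hk <;> decide
  rw [h0, zero_add]

-- B-side: a dict of the shape pvKeys.map (k, v k) looks up to v k on each of the six keys
lemma pvGetD_mk_map (v : String → Int) (k : String) (hk : k ∈ pvKeys) :
    (PySem.Dict.mk (pvKeys.map (fun k => (k, v k)))).getD k 0 = v k := by
  fin_cases hk <;>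
    simp [pvKeys, PySem.Dict.getD_eq_get?_getD, PySem.Dict.get?_mk_cons]

theorem pvTally_eq (fuel : Nat) (hs : List (List (String × String))) (hf : hs.length ≤ fuel) :
    pvTallyF fuel hs = pvKeys.map (fun k => (k, ((hs.map pvLevel).count k : Int))) := by
  induction fuel generalizing hs with
  | zero =>
    have : hs = [] := List.length_eq_zero_iff.mp (Nat.le_zero.mp hf)
    subst this
    simp [pvTallyF]
  | succ fuel ih =>
    rw [pvTallyF]
    by_cases hnil : hs = []
    · subst hnil; simp
    · rw [if_neg hnil]
      by_cases h1 : hs.length = 1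
      · rw [if_pos h1]
        obtain ⟨a, ha⟩ : ∃ a, hs = [a] := List.length_eq_one_iff.mp h1
        subst ha
        refine List.map_congr_left fun k hk => ?_
        have hA : (PySem.List.pyGet? [a] 0).getD [] = a := by rfl
        simp only [hA, List.map_cons, List.map_nil, List.count_cons, List.count_nil]
        by_cases hke : k = pvLevel a
        · simp [hke]
        · simp [hke]
          exact fun e => hke e.symm
      · rw [if_neg h1]
        have hlen2 : 2 ≤ hs.length := by
          have : hs.length ≠ 0 := fun e => hnil (List.length_eq_zero_iff.mp e)
          omega
        show List.map (fun k =>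
            (k, (PySem.Dict.mk (pvTallyF fuel (PySem.List.slice hs none (some ((hs.length / 2 : Nat) : Int))))).getD k 0
              + (PySem.Dict.mk (pvTallyF fuel (PySem.List.slice hs (some ((hs.length / 2 : Nat) : Int)) none))).getD k 0)) pvKeys = _
        rw [PySem.List.slice_to_natCast, PySem.List.slice_from_natCast]
        rw [ih _ (by simp only [List.length_take]; omega),
            ih _ (by simp only [List.length_drop]; omega)]
        refine List.map_congr_left fun k hk => ?_
        rw [pvGetD_mk_map _ k hk, pvGetD_mk_map _ k hk]
        conv_rhs => rw [show hs = hs.take (hs.length / 2) ++ hs.drop (hs.length / 2) from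
          (List.take_append_drop _ hs).symm]
        rw [List.map_append, List.count_append]
        push_cast
        rfl

-- ===== VERDICT (by name: the statement is the Claim_ definition above) =====
theorem get_header_hierarchy_spec : Claim_equal_get_header_hierarchy := by
  intro headers _
  show get_header_hierarchy headers = get_header_hierarchy_alt headers
  rw [pvA_eq, get_header_hierarchy_alt, pvTally_eq headers.length headers le_rfl]
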